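-- pv_equiv track=rewrite | github.com/momentum-cohort-2019-05/w2-mystery-word-djknox | mystery_word.py | group_words_by_difficulty
-- ===== SOURCE A (Python) =====
-- def group_words_by_difficulty(a_list_of_words):
--     """
--     Given a list of words, group the words based on length and return a dictionary of the groups.
--         easy: 4-6 characters
--         normal: 6-8 characters
--         difficult: 8+ characters
--     """
--     easy_list = [word for word in a_list_of_words if len(word) >= 4 and len(word) <= 6]
--     normal_list = [word for word in a_list_of_words if len(word) >= 6 and len(word) <= 8]
--     difficult_list = [word for word in a_list_of_words if len(word) >= 8]
--
--     return {
--         'easy': easy_list,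
--         'normal': normal_list,
--         'difficult': difficult_list
--     }
-- ===== SOURCE B (Python) =====
-- # Table-driven: the buckets a word belongs to are precomputed per length (0..8,
-- # default 'difficult'), so the loop does one dict lookup and no comparisons.
-- _TABLE = {
--     0: (), 1: (), 2: (), 3: (),
--     4: ('easy',), 5: ('easy',),
--     6: ('easy', 'normal'),
--     7: ('normal',),
--     8: ('normal', 'difficult'),
-- }
--
-- def group_words_by_difficulty(a_list_of_words):
--     groups = {'easy': [], 'normal': [], 'difficult': []}
--     for word in a_list_of_words:
--         for name in _TABLE.get(len(word), ('difficult',)):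
--             groups[name].append(word)
--     return groups
-- ===== Notes on version B (the rewrite author's own statement) =====
-- stated objective: alternative
-- what changed: Replaced three full comprehension scans with range comparisons by a table-driven single pass: a precomputed length-to-buckets dict decides membership, so each word is classified by one dict lookup (no comparisons) and appended to every bucket it belongs to.
import Mathlib
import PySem

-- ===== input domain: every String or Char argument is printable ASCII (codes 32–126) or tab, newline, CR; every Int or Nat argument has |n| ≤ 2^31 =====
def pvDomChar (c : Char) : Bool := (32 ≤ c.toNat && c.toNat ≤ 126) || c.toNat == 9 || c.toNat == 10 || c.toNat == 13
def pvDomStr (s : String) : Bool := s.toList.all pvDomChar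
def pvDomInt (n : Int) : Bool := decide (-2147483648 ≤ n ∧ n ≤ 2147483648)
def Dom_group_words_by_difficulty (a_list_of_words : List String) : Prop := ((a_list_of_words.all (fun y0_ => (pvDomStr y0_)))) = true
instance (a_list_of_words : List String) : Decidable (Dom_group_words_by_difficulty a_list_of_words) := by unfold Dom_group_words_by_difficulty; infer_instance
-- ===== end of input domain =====

-- B replaces A's three range-comparison scans by a single table-driven pass (a length→buckets lookup); alternative decomposition, same asymptotics.

-- ===== PORT A =====
def group_words_by_difficulty (a_list_of_words : List String) : List (String × List String) :=
  let easy_list := a_list_of_words.filter (fun word => 4 ≤ PySem.Str.len word && PySem.Str.len word ≤ 6)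
  let normal_list := a_list_of_words.filter (fun word => 6 ≤ PySem.Str.len word && PySem.Str.len word ≤ 8)
  let difficult_list := a_list_of_words.filter (fun word => 8 ≤ PySem.Str.len word)
  [("easy", easy_list), ("normal", normal_list), ("difficult", difficult_list)]

-- ===== PORT B =====
-- the module-level _TABLE dict of Source B
def gwbd_TABLE : PySem.Dict Int (List String) :=
  PySem.Dict.ofList [(0, []), (1, []), (2, []), (3, []),
    (4, ["easy"]), (5, ["easy"]), (6, ["easy", "normal"]),
    (7, ["normal"]), (8, ["normal", "difficult"])]

def group_words_by_difficulty_alt (a_list_of_words : List String) : List (String × List String) :=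
  (a_list_of_words.foldl
    (fun groups word =>
      (PySem.Dict.getD gwbd_TABLE (PySem.Str.len word) ["difficult"]).foldl
        (fun g name => PySem.Dict.modify g name [] (fun l => l ++ [word])) groups)
    (PySem.Dict.ofList [("easy", []), ("normal", []), ("difficult", [])])).items

-- ===== PRECONDITION & SPEC =====
def Spec_group_words_by_difficulty (a_list_of_words : List String) (out : List (String × List String)) : Prop := out = group_words_by_difficulty_alt a_list_of_words
instance (a_list_of_words : List String) (out : List (String × List String)) : Decidable (Spec_group_words_by_difficulty a_list_of_words out) := by unfold Spec_group_words_by_difficulty; infer_instance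

-- ===== CLAIM (what is proved, stated in full; the proofs are below) =====
def Claim_equal_group_words_by_difficulty : Prop := ∀ (a_list_of_words : List String), Dom_group_words_by_difficulty a_list_of_words → Spec_group_words_by_difficulty a_list_of_words (group_words_by_difficulty a_list_of_words)

-- ===== LEMMAS AND PROOFS =====

-- the table lookup, characterised by the three range tests A uses
theorem gwbd_table_lookup (k : Nat) :
    PySem.Dict.getD gwbd_TABLE (k : Int) ["difficult"] =
      (if 4 ≤ k ∧ k ≤ 6 then ["easy"] else []) ++
      (if 6 ≤ k ∧ k ≤ 8 then ["normal"] else []) ++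
      (if 8 ≤ k then ["difficult"] else []) := by
  rcases Nat.lt_or_ge k 9 with h | h
  · interval_cases k <;> rfl
  · rw [PySem.Dict.getD_of_not_contains]
    · have h4 : ¬ (4 ≤ k ∧ k ≤ 6) := by omega
      have h6 : ¬ (6 ≤ k ∧ k ≤ 8) := by omega
      have h8 : 8 ≤ k := by omega
      simp [h4, h6, h8]
    · simp [gwbd_TABLE, PySem.Dict.ofList, PySem.Dict.update, PySem.Dict.insert,
        PySem.Dict.empty, PySem.Dict.contains]
      omega

-- Dict.modify on the literal 3-bucket dict, one lemma per key
theorem gwbd_modify_easy (e n d : List String) (w : String) :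
    PySem.Dict.modify (PySem.Dict.ofList [("easy", e), ("normal", n), ("difficult", d)])
        "easy" [] (fun l => l ++ [w]) =
      PySem.Dict.ofList [("easy", e ++ [w]), ("normal", n), ("difficult", d)] := by
  simp [PySem.Dict.modify, PySem.Dict.ofList, PySem.Dict.update, PySem.Dict.insert,
    PySem.Dict.empty, PySem.Dict.getD, PySem.Dict.get?, PySem.Dict.contains]

theorem gwbd_modify_normal (e n d : List String) (w : String) :
    PySem.Dict.modify (PySem.Dict.ofList [("easy", e), ("normal", n), ("difficult", d)])
        "normal" [] (fun l => l ++ [w]) =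
      PySem.Dict.ofList [("easy", e), ("normal", n ++ [w]), ("difficult", d)] := by
  simp [PySem.Dict.modify, PySem.Dict.ofList, PySem.Dict.update, PySem.Dict.insert,
    PySem.Dict.empty, PySem.Dict.getD, PySem.Dict.get?, PySem.Dict.contains]

theorem gwbd_modify_difficult (e n d : List String) (w : String) :
    PySem.Dict.modify (PySem.Dict.ofList [("easy", e), ("normal", n), ("difficult", d)])
        "difficult" [] (fun l => l ++ [w]) =
      PySem.Dict.ofList [("easy", e), ("normal", n), ("difficult", d ++ [w])] := by
  simp [PySem.Dict.modify, PySem.Dict.ofList, PySem.Dict.update, PySem.Dict.insert,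
    PySem.Dict.empty, PySem.Dict.getD, PySem.Dict.get?, PySem.Dict.contains]

-- one word's inner foldl on the running 3-bucket dict
theorem gwbd_step (w : String) (e n d : List String) :
    (PySem.Dict.getD gwbd_TABLE (PySem.Str.len w) ["difficult"]).foldl
        (fun g name => PySem.Dict.modify g name [] (fun l => l ++ [w]))
        (PySem.Dict.ofList [("easy", e), ("normal", n), ("difficult", d)]) =
      PySem.Dict.ofList
        [("easy", if 4 ≤ w.length ∧ w.length ≤ 6 then e ++ [w] else e),
         ("normal", if 6 ≤ w.length ∧ w.length ≤ 8 then n ++ [w] else n),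
         ("difficult", if 8 ≤ w.length then d ++ [w] else d)] := by
  have hlen : PySem.Str.len w = (w.length : Int) := by simp [PySem.Str.len]
  rw [hlen, gwbd_table_lookup w.length]
  split_ifs <;>
    simp only [List.nil_append, List.append_nil, List.cons_append, List.foldl_cons,
      List.foldl_nil, gwbd_modify_easy, gwbd_modify_normal, gwbd_modify_difficult]

-- loop invariant
theorem gwbd_fold_eq (xs : List String) (e n d : List String) :
    xs.foldl
      (fun groups word =>
        (PySem.Dict.getD gwbd_TABLE (PySem.Str.len word) ["difficult"]).foldl
          (fun g name => PySem.Dict.modify g name [] (fun l => l ++ [word])) groups)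
      (PySem.Dict.ofList [("easy", e), ("normal", n), ("difficult", d)]) =
    PySem.Dict.ofList
      [("easy", e ++ xs.filter (fun w => 4 ≤ PySem.Str.len w && PySem.Str.len w ≤ 6)),
       ("normal", n ++ xs.filter (fun w => 6 ≤ PySem.Str.len w && PySem.Str.len w ≤ 8)),
       ("difficult", d ++ xs.filter (fun w => 8 ≤ PySem.Str.len w))] := by
  induction xs generalizing e n d with
  | nil => simp
  | cons w rest ih =>
    simp only [List.foldl_cons, gwbd_step, List.filter_cons]
    rw [ih]
    have hE : ∀ L, e ++ (if (4 ≤ PySem.Str.len w && PySem.Str.len w ≤ 6) = true then w :: L else L)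
        = (if 4 ≤ w.length ∧ w.length ≤ 6 then e ++ [w] else e) ++ L := by
      intro L; simp only [PySem.Str.len]; split_ifs <;> simp_all
    have hN : ∀ L, n ++ (if (6 ≤ PySem.Str.len w && PySem.Str.len w ≤ 8) = true then w :: L else L)
        = (if 6 ≤ w.length ∧ w.length ≤ 8 then n ++ [w] else n) ++ L := by
      intro L; simp only [PySem.Str.len]; split_ifs <;> simp_all
    have hD : ∀ L, d ++ (if decide (8 ≤ PySem.Str.len w) = true then w :: L else L)
        = (if 8 ≤ w.length then d ++ [w] else d) ++ L := by
      intro L; simp only [PySem.Str.len]; split_ifs <;> simp_all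
    rw [hE, hN, hD]

-- ===== VERDICT (by name: the statement is the Claim_ definition above) =====
theorem group_words_by_difficulty_spec : Claim_equal_group_words_by_difficulty := by
  intro xs _
  unfold Spec_group_words_by_difficulty group_words_by_difficulty group_words_by_difficulty_alt
  rw [gwbd_fold_eq]
  simp [PySem.Dict.ofList, PySem.Dict.update, PySem.Dict.insert, PySem.Dict.empty,
    PySem.Dict.contains]
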